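-- pv_equiv track=rewrite | github.com/syranis/foobar | find-the-access-codes.py | worsesolution
-- ===== SOURCE A (Python) =====
-- def worsesolution(l):
--     cache = []
--     triples = 0
--     for j in range(1, len(l)):
--         for k in range(j + 1, len(l)):
--             if l[k] % l[j] == 0:
--                 cache.append({'j': [l[j], j], 'k': [l[k], k]})
--
--     for i in range(len(l)):
--         for double in cache:
--             if double['j'][0] % l[i] == 0 and i not in (double['j'][1], double['k'][1]):
--                 triples += 1
--
--     return triples
-- ===== SOURCE B (Python) =====
-- def worsesolution(l):
--     n = len(l)
--     # divisor-count table: D[i] = how many nonzero elements of l divide l[i]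
--     D = [sum(1 for x in l if x != 0 and v % x == 0) for v in l]
--     triples = 0
--     for j in range(1, n):
--         for k in range(j + 1, n):
--             if l[k] % l[j] == 0:
--                 triples += D[j] - 1 - (1 if l[j] % l[k] == 0 else 0)
--     return triples
-- ===== Notes on version B (the rewrite author's own statement) =====
-- stated objective: faster
-- what changed: Replaces the O(n^3) cache-of-pairs plus full i-scan with a precomputed divisor-count table D[j] so each valid (j,k) pair contributes D[j]-1-[l[j]%l[k]==0] in O(1).
import Mathlib
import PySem

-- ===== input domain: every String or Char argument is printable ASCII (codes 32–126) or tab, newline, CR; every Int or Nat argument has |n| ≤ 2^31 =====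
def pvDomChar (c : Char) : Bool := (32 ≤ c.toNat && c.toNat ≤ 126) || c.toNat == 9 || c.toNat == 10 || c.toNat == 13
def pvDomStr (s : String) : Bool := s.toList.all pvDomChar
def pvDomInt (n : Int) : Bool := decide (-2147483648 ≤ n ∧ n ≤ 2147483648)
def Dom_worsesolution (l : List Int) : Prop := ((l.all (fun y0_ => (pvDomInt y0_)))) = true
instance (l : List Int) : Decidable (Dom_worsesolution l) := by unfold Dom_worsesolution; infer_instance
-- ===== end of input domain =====

-- B replaces A's O(n^3) cache-of-pairs plus full i-scan with a precomputed divisor-count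
-- table, giving each valid (j,k) pair its contribution in O(1) (measured faster, O(n^2)).

-- ===== PORT A =====
def worsesolution (l : List Int) : Int :=
  let cache : List ((Int × Int) × (Int × Int)) :=
    (PySem.List.pyRange 1 (PySem.List.len l) 1).foldl (fun acc j =>
      (PySem.List.pyRange (j + 1) (PySem.List.len l) 1).foldl (fun acc2 k =>
        if PySem.Int.mod (PySem.List.pyGetD l k 0) (PySem.List.pyGetD l j 0) = 0 then
          acc2 ++ [((PySem.List.pyGetD l j 0, j), (PySem.List.pyGetD l k 0, k))]
        else acc2) acc) []
  (PySem.List.pyRange 0 (PySem.List.len l) 1).foldl (fun t i =>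
    cache.foldl (fun t2 d =>
      if PySem.Int.mod d.1.1 (PySem.List.pyGetD l i 0) = 0 ∧ ¬(i = d.1.2 ∨ i = d.2.2) then
        t2 + 1
      else t2) t) 0

-- ===== PORT B =====
def worsesolution_alt (l : List Int) : Int :=
  let D : List Int := l.map (fun v =>
    (l.map (fun x => if x ≠ 0 ∧ PySem.Int.mod v x = 0 then (1 : Int) else 0)).sum)
  (PySem.List.pyRange 1 (PySem.List.len l) 1).foldl (fun t j =>
    (PySem.List.pyRange (j + 1) (PySem.List.len l) 1).foldl (fun t2 k =>
      if PySem.Int.mod (PySem.List.pyGetD l k 0) (PySem.List.pyGetD l j 0) = 0 then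
        t2 + PySem.List.pyGetD D j 0 - 1 -
          (if PySem.Int.mod (PySem.List.pyGetD l j 0) (PySem.List.pyGetD l k 0) = 0 then 1 else 0)
      else t2) t) 0

-- ===== PRECONDITION & SPEC =====
-- Pre_ excludes exactly the inputs on which Python A raises ZeroDivisionError: a 0 at an
-- interior position 1..n-2 (reached as a divisor in A's pair-building loop), or a 0 anywhere
-- in the list while some pair (j,k), 1 ≤ j < k, satisfies l[k] % l[j] == 0 (then A's second
-- loop divides that pair's value by the 0). On every input where A returns, Pre_ holds.
def Pre_worsesolution (l : List Int) : Prop :=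
  (0 : Int) ∉ (l.drop 1).dropLast ∧
  ((0 : Int) ∈ l → ∀ j ∈ List.range l.length, ∀ k ∈ List.range l.length,
      1 ≤ j → j < k → PySem.Int.mod (l.getD k 0) (l.getD j 0) ≠ 0)
instance (l : List Int) : Decidable (Pre_worsesolution l) := by unfold Pre_worsesolution; infer_instance
def pvWitness_worsesolution : List Int := [1, 2, 4, 8]

def Spec_worsesolution (l : List Int) (out : Int) : Prop := out = worsesolution_alt l
instance (l : List Int) (out : Int) : Decidable (Spec_worsesolution l out) := by unfold Spec_worsesolution; infer_instance

-- ===== CLAIM (what is proved, stated in full; the proofs are below) =====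
def Claim_equal_worsesolution : Prop := ∀ (l : List Int), Dom_worsesolution l → Pre_worsesolution l → Spec_worsesolution l (worsesolution l)

-- ===== LEMMAS AND PROOFS =====

lemma ws_sum_comm {α β : Type} (xs : List α) (ys : List β) (g : α → β → Int) :
    (xs.map (fun i => (ys.map (g i)).sum)).sum = (ys.map (fun d => (xs.map (fun i => g i d)).sum)).sum := by
  induction xs with
  | nil => simp [List.sum_eq_zero]
  | cons x xs ih => simp [ih]

lemma ws_sum_filter {β : Type} (p : β → Bool) (ys : List β) (f : β → Int) :
    ((ys.filter p).map f).sum = (ys.map (fun y => if p y then f y else 0)).sum := by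
  induction ys with
  | nil => simp
  | cons y ys ih => by_cases h : p y <;> simp [h, ih]

lemma ws_sum_map_sub {α : Type} (xs : List α) (f g : α → Int) :
    (xs.map (fun x => f x - g x)).sum = (xs.map f).sum - (xs.map g).sum := by
  induction xs with
  | nil => simp
  | cons x xs ih => simp [ih]; ring

lemma ws_sum_pick (xs : List Int) (h : xs.Nodup) (j : Int) (hj : j ∈ xs) (v : Int) :
    (xs.map (fun i => if i = j then v else 0)).sum = v := by
  induction xs with
  | nil => cases hj
  | cons x xs ih =>
    by_cases hx : x = j
    · subst hx
      have hzero : ((xs.map (fun i => if i = x then v else 0)).sum) = 0 := by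
        apply List.sum_eq_zero
        intro y hy
        obtain ⟨i, hi, rfl⟩ := List.mem_map.mp hy
        have : i ≠ x := fun e => (List.nodup_cons.mp h).1 (e ▸ hi)
        simp [this]
      simp [hzero]
    · rcases List.mem_cons.mp hj with h' | hm
      · exact absurd h'.symm hx
      · simp only [List.map_cons, List.sum_cons, if_neg hx]
        rw [ih (List.nodup_cons.mp h).2 hm]; ring

def wsE (l : List Int) (j k : Int) : (Int × Int) × (Int × Int) :=
  ((PySem.List.pyGetD l j 0, j), (PySem.List.pyGetD l k 0, k))

def wsInd (l : List Int) (i : Int) (d : (Int × Int) × (Int × Int)) : Int :=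
  if PySem.Int.mod d.1.1 (PySem.List.pyGetD l i 0) = 0 ∧ ¬(i = d.1.2 ∨ i = d.2.2) then 1 else 0

lemma ws_ind_pointwise (l : List Int) (j k i : Int) (hne : j ≠ k) :
    wsInd l i (wsE l j k)
      = (if PySem.Int.mod (PySem.List.pyGetD l j 0) (PySem.List.pyGetD l i 0) = 0 then 1 else 0)
        - (if i = j then 1 else 0)
        - (if i = k then (if PySem.Int.mod (PySem.List.pyGetD l j 0) (PySem.List.pyGetD l k 0) = 0 then (1:Int) else 0) else 0) := by
  unfold wsInd wsE
  have hcj : PySem.Int.mod (PySem.List.pyGetD l j 0) (PySem.List.pyGetD l j 0) = 0 :=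
    (PySem.Int.mod_eq_zero_iff_dvd _ _).mpr dvd_rfl
  by_cases hij : i = j
  · subst hij; simp [hcj, hne]
  · by_cases hik : i = k
    · subst hik; simp [hij]
    · simp [hij, hik]

lemma ws_pair (l : List Int) (j k : Int) (h1 : 1 ≤ j) (hjk : j < k) (hk : k < (l.length : Int)) :
    ((PySem.List.pyRange 0 (l.length : Int) 1).map (fun i => wsInd l i (wsE l j k))).sum
      = (l.map (fun x => if PySem.Int.mod (PySem.List.pyGetD l j 0) x = 0 then (1:Int) else 0)).sum
        - 1 - (if PySem.Int.mod (PySem.List.pyGetD l j 0) (PySem.List.pyGetD l k 0) = 0 then 1 else 0) := by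
  have hne : j ≠ k := ne_of_lt hjk
  have hstep : (fun i => wsInd l i (wsE l j k))
      = fun i => ((fun i => (if PySem.Int.mod (PySem.List.pyGetD l j 0) (PySem.List.pyGetD l i 0) = 0 then (1:Int) else 0)
            - (if i = j then 1 else 0)) i
          - (fun i => (if i = k then (if PySem.Int.mod (PySem.List.pyGetD l j 0) (PySem.List.pyGetD l k 0) = 0 then (1:Int) else 0) else 0)) i) := by
    funext i; rw [ws_ind_pointwise l j k i hne]
  rw [hstep, ws_sum_map_sub, ws_sum_map_sub]
  have hnd := PySem.List.nodup_pyRange_one 0 ((l.length : Int))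
  have hjmem : j ∈ PySem.List.pyRange 0 (l.length : Int) 1 := by
    rw [PySem.List.mem_pyRange_one]; omega
  have hkmem : k ∈ PySem.List.pyRange 0 (l.length : Int) 1 := by
    rw [PySem.List.mem_pyRange_one]; omega
  rw [ws_sum_pick _ hnd j hjmem, ws_sum_pick _ hnd k hkmem]
  have hl : ∀ c : Int → Int,
      ((PySem.List.pyRange 0 (l.length : Int) 1).map (fun i => c (PySem.List.pyGetD l i 0))).sum
        = (l.map c).sum := by
    intro c
    rw [show (fun i => c (PySem.List.pyGetD l i 0)) = c ∘ (fun i => PySem.List.pyGetD l i 0) from rfl,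
        ← List.map_map, PySem.List.map_pyGetD_pyRange_zero']
  rw [hl (fun x => if PySem.Int.mod (PySem.List.pyGetD l j 0) x = 0 then (1:Int) else 0)]

lemma ws_sum_flatMap (f : Int → List Int) (l : List Int) :
    (l.flatMap f).sum = (l.map (fun a => (f a).sum)).sum := by
  induction l with
  | nil => simp
  | cons x xs ih => simp [ih]

lemma ws_if_add (t2 : Int) (v : Int) (P : Prop) [Decidable P] :
    (if P then t2 + v else t2) = t2 + (if P then v else 0) := by
  split_ifs <;> ring

-- from Pre_'s second conjunct: a valid cache pair forces 0 ∉ l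
lemma ws_no_zero (l : List Int) (hPre : Pre_worsesolution l) (j k : Int)
    (h1 : 1 ≤ j) (hjk : j < k) (hk : k < (l.length : Int))
    (hp : PySem.Int.mod (PySem.List.pyGetD l k 0) (PySem.List.pyGetD l j 0) = 0) :
    (0 : Int) ∉ l := by
  intro hmem
  have hjn : j.toNat < l.length := by omega
  have hkn : k.toNat < l.length := by omega
  have h2 := hPre.2 hmem j.toNat (List.mem_range.mpr hjn) k.toNat (List.mem_range.mpr hkn)
    (by omega) (by omega)
  apply h2
  rw [List.getD_eq_getElem _ _ hkn, List.getD_eq_getElem _ _ hjn]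
  rw [PySem.List.pyGetD_eq_getElem l 0 (by omega) hk,
      PySem.List.pyGetD_eq_getElem l 0 (by omega) (by omega : j < (l.length : Int))] at hp
  exact hp

lemma ws_main (l : List Int) (hPre : Pre_worsesolution l) : worsesolution l = worsesolution_alt l := by
  unfold worsesolution worsesolution_alt
  simp only [PySem.List.len_eq]
  set n : Int := (l.length : Int) with hn
  -- Stage 1: cache as a flat list
  have hinner1 : ∀ (acc : List ((Int × Int) × (Int × Int))) (j : Int),
      (PySem.List.pyRange (j + 1) n 1).foldl (fun acc2 k =>
        if PySem.Int.mod (PySem.List.pyGetD l k 0) (PySem.List.pyGetD l j 0) = 0 then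
          acc2 ++ [((PySem.List.pyGetD l j 0, j), (PySem.List.pyGetD l k 0, k))]
        else acc2) acc
      = acc ++ (((PySem.List.pyRange (j + 1) n 1).filter
          (fun k => decide (PySem.Int.mod (PySem.List.pyGetD l k 0) (PySem.List.pyGetD l j 0) = 0))).map
            (wsE l j)) := by
    intro acc j
    rw [PySem.List.foldl_congr_mem _ _ (fun acc2 k =>
      if (fun k => decide (PySem.Int.mod (PySem.List.pyGetD l k 0) (PySem.List.pyGetD l j 0) = 0)) k = true
      then acc2 ++ [wsE l j k] else acc2) _ (by intro acc2 k hk; simp [wsE])]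
    exact PySem.List.foldl_append_if _ _ _ _
  have hcache : (PySem.List.pyRange 1 n 1).foldl (fun acc j =>
      (PySem.List.pyRange (j + 1) n 1).foldl (fun acc2 k =>
        if PySem.Int.mod (PySem.List.pyGetD l k 0) (PySem.List.pyGetD l j 0) = 0 then
          acc2 ++ [((PySem.List.pyGetD l j 0, j), (PySem.List.pyGetD l k 0, k))]
        else acc2) acc) []
      = (PySem.List.pyRange 1 n 1).flatMap (fun j =>
          (((PySem.List.pyRange (j + 1) n 1).filter
            (fun k => decide (PySem.Int.mod (PySem.List.pyGetD l k 0) (PySem.List.pyGetD l j 0) = 0))).map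
              (wsE l j))) := by
    rw [PySem.List.foldl_congr_mem _ _ (fun acc j => acc ++ (((PySem.List.pyRange (j + 1) n 1).filter
          (fun k => decide (PySem.Int.mod (PySem.List.pyGetD l k 0) (PySem.List.pyGetD l j 0) = 0))).map
            (wsE l j))) _ (by intro acc j hj; exact hinner1 acc j)]
    rw [PySem.List.foldl_append_eq_flatMap]
    simp
  rw [hcache]
  set cacheL := (PySem.List.pyRange 1 n 1).flatMap (fun j =>
          (((PySem.List.pyRange (j + 1) n 1).filter
            (fun k => decide (PySem.Int.mod (PySem.List.pyGetD l k 0) (PySem.List.pyGetD l j 0) = 0))).map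
              (wsE l j))) with hcl
  -- Stage 2: A's counting phase as a double sum
  have hA2 : ∀ (t i : Int), cacheL.foldl (fun t2 d =>
      if PySem.Int.mod d.1.1 (PySem.List.pyGetD l i 0) = 0 ∧ ¬(i = d.1.2 ∨ i = d.2.2) then t2 + 1 else t2) t
      = t + (cacheL.map (fun d => wsInd l i d)).sum := by
    intro t i
    rw [PySem.List.foldl_congr_mem _ _ (fun t2 d => t2 + wsInd l i d) _
      (by intro t2 d hd; unfold wsInd; exact ws_if_add t2 1 _)]
    exact PySem.List.foldl_add _ _ _
  rw [PySem.List.foldl_congr_mem _ _ (fun t i => t + (cacheL.map (fun d => wsInd l i d)).sum) _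
      (by intro t i hi; exact hA2 t i)]
  rw [PySem.List.foldl_add]
  rw [ws_sum_comm]
  simp only [hcl, List.map_flatMap, ws_sum_flatMap, List.map_map, ws_sum_filter]
  -- Stage 3: B as a double sum
  set Dl : List Int := l.map (fun v =>
    (l.map (fun x => if x ≠ 0 ∧ PySem.Int.mod v x = 0 then (1 : Int) else 0)).sum) with hDl
  have hB2 : ∀ (t j : Int), (PySem.List.pyRange (j + 1) n 1).foldl (fun t2 k =>
      if PySem.Int.mod (PySem.List.pyGetD l k 0) (PySem.List.pyGetD l j 0) = 0 then
        t2 + PySem.List.pyGetD Dl j 0 - 1 -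
          (if PySem.Int.mod (PySem.List.pyGetD l j 0) (PySem.List.pyGetD l k 0) = 0 then 1 else 0)
      else t2) t
      = t + ((PySem.List.pyRange (j + 1) n 1).map (fun k =>
          if PySem.Int.mod (PySem.List.pyGetD l k 0) (PySem.List.pyGetD l j 0) = 0 then
            PySem.List.pyGetD Dl j 0 - 1 -
              (if PySem.Int.mod (PySem.List.pyGetD l j 0) (PySem.List.pyGetD l k 0) = 0 then 1 else 0)
          else 0)).sum := by
    intro t j
    rw [PySem.List.foldl_congr_mem _ _ (fun t2 k => t2 +
        (if PySem.Int.mod (PySem.List.pyGetD l k 0) (PySem.List.pyGetD l j 0) = 0 then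
          PySem.List.pyGetD Dl j 0 - 1 -
            (if PySem.Int.mod (PySem.List.pyGetD l j 0) (PySem.List.pyGetD l k 0) = 0 then 1 else 0)
        else 0)) _ ?_]
    · exact PySem.List.foldl_add _ _ _
    · intro t2 k hk
      rw [show (if PySem.Int.mod (PySem.List.pyGetD l k 0) (PySem.List.pyGetD l j 0) = 0 then
          t2 + PySem.List.pyGetD Dl j 0 - 1 -
            (if PySem.Int.mod (PySem.List.pyGetD l j 0) (PySem.List.pyGetD l k 0) = 0 then 1 else 0)
        else t2)
        = (if PySem.Int.mod (PySem.List.pyGetD l k 0) (PySem.List.pyGetD l j 0) = 0 then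
          t2 + (PySem.List.pyGetD Dl j 0 - 1 -
            (if PySem.Int.mod (PySem.List.pyGetD l j 0) (PySem.List.pyGetD l k 0) = 0 then 1 else 0))
        else t2) from by split_ifs <;> ring]
      exact ws_if_add t2 _ _
  rw [PySem.List.foldl_congr_mem _ _ (fun t j => t + ((PySem.List.pyRange (j + 1) n 1).map (fun k =>
        if PySem.Int.mod (PySem.List.pyGetD l k 0) (PySem.List.pyGetD l j 0) = 0 then
          PySem.List.pyGetD Dl j 0 - 1 -
            (if PySem.Int.mod (PySem.List.pyGetD l j 0) (PySem.List.pyGetD l k 0) = 0 then 1 else 0)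
        else 0)).sum) _ (by intro t j hj; exact hB2 t j)]
  rw [PySem.List.foldl_add]
  simp only [zero_add]
  -- Stage 4: pointwise equality of the two double sums
  refine congrArg (List.sum : List Int → Int) (List.map_congr_left ?_)
  intro j hj
  have hjb := PySem.List.mem_pyRange_one.mp hj
  refine congrArg (List.sum : List Int → Int) (List.map_congr_left ?_)
  intro k hk
  have hkb := PySem.List.mem_pyRange_one.mp hk
  simp only [Function.comp_apply, decide_eq_true_eq]
  by_cases hp : PySem.Int.mod (PySem.List.pyGetD l k 0) (PySem.List.pyGetD l j 0) = 0
  · rw [if_pos hp]; rw [if_pos hp]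
    have h0 : (0 : Int) ∉ l :=
      ws_no_zero l hPre j k hjb.1 (by omega) (by omega : k < (l.length : Int)) hp
    have hpair := ws_pair l j k hjb.1 (by omega) (by omega : k < (l.length : Int))
    rw [hpair]
    have hD : PySem.List.pyGetD Dl j 0
        = (l.map (fun x => if x ≠ 0 ∧ PySem.Int.mod (PySem.List.pyGetD l j 0) x = 0 then (1 : Int) else 0)).sum := by
      have hjlt : j < ((l.map (fun v => (l.map (fun x => if x ≠ 0 ∧ PySem.Int.mod v x = 0 then (1 : Int) else 0)).sum)).length : Int) := by
        simp; omega
      rw [hDl, PySem.List.pyGetD_eq_getElem _ 0 (by omega) hjlt]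
      rw [List.getElem_map]
      rw [PySem.List.pyGetD_eq_getElem l 0 (by omega) (by omega)]
    rw [hD]
    have hguard : (l.map (fun x => if x ≠ 0 ∧ PySem.Int.mod (PySem.List.pyGetD l j 0) x = 0 then (1 : Int) else 0))
        = l.map (fun x => if PySem.Int.mod (PySem.List.pyGetD l j 0) x = 0 then (1 : Int) else 0) := by
      refine List.map_congr_left ?_
      intro x hx
      have hxne : x ≠ 0 := fun e => h0 (e ▸ hx)
      simp [hxne]
    rw [hguard]
  · rw [if_neg hp]; rw [if_neg hp]

-- ===== VERDICT (by name: the statement is the Claim_ definition above) =====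
theorem worsesolution_spec : Claim_equal_worsesolution := by
  intro l _ hPre
  unfold Spec_worsesolution
  exact ws_main l hPre
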